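-- pv_equiv track=rewrite | github.com/axrati/pykeral | lib/utils/tools.py | new_vs_update
-- ===== SOURCE A (Python) =====
-- def new_vs_update (arr1, arr2):
--     creates = []
--     updates = []
--     for i in arr1:
--         if i not in arr2:
--             if i not in creates:
--                 creates.append(i)
--         else:
--             if i not in updates:
--                 updates.append(i)
--     return creates,updates
-- ===== SOURCE B (Python) =====
-- def new_vs_update(arr1, arr2):
--     deduped = []
--     for i in arr1:
--         if i not in deduped:
--             deduped.append(i)
--     creates = [i for i in deduped if i not in arr2]
--     updates = [i for i in deduped if i in arr2]
--     return creates, updates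
-- ===== Notes on version B (the rewrite author's own statement) =====
-- stated objective: simpler
-- what changed: Replaces A's single combined pass with per-bucket dedup checks by a global dedup pass followed by two partition comprehensions over the deduplicated list.
import Mathlib
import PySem

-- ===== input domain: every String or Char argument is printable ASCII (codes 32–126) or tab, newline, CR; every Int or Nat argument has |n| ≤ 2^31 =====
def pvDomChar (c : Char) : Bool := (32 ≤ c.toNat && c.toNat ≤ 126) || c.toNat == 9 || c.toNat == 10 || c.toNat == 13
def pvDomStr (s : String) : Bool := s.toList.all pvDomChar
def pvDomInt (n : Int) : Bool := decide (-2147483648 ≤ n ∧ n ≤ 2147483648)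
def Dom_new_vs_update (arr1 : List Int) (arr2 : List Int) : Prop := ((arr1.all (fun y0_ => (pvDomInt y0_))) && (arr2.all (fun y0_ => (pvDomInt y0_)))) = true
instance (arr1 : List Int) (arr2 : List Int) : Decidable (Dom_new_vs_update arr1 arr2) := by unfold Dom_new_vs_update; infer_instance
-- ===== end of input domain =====

-- B replaces A's single combined loop (per-bucket dedup) by a global dedup pass
-- followed by two partition passes; same return value, objective: simpler decomposition.

-- ===== PORT A =====
-- A's loop over arr1 with accumulators creates/updates, branches in source order.
def nvuLoopA (arr2 : List Int) : List Int → List Int → List Int → List Int × List Int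
  | [], creates, updates => (creates, updates)
  | i :: rest, creates, updates =>
    if i ∉ arr2 then
      if i ∉ creates then nvuLoopA arr2 rest (creates ++ [i]) updates
      else nvuLoopA arr2 rest creates updates
    else
      if i ∉ updates then nvuLoopA arr2 rest creates (updates ++ [i])
      else nvuLoopA arr2 rest creates updates

def new_vs_update (arr1 : List Int) (arr2 : List Int) : List Int × List Int :=
  nvuLoopA arr2 arr1 [] []

-- ===== PORT B =====
-- B's first loop: append each item of arr1 to deduped if not already present.
def nvuDedup : List Int → List Int → List Int
  | [], deduped => deduped
  | i :: rest, deduped =>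
    if i ∉ deduped then nvuDedup rest (deduped ++ [i])
    else nvuDedup rest deduped

def new_vs_update_alt (arr1 : List Int) (arr2 : List Int) : List Int × List Int :=
  let deduped := nvuDedup arr1 []
  (deduped.filter (fun i => decide (i ∉ arr2)), deduped.filter (fun i => decide (i ∈ arr2)))

-- ===== PRECONDITION & SPEC =====
def Spec_new_vs_update (arr1 : List Int) (arr2 : List Int) (out : List Int × List Int) : Prop := out = new_vs_update_alt arr1 arr2
instance (arr1 : List Int) (arr2 : List Int) (out : List Int × List Int) : Decidable (Spec_new_vs_update arr1 arr2 out) := by unfold Spec_new_vs_update; infer_instance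

-- ===== CLAIM (what is proved, stated in full; the proofs are below) =====
def Claim_equal_new_vs_update : Prop := ∀ (arr1 : List Int) (arr2 : List Int), Dom_new_vs_update arr1 arr2 → Spec_new_vs_update arr1 arr2 (new_vs_update arr1 arr2)

-- ===== LEMMAS AND PROOFS =====
-- Invariant: along the traversal, A's accumulators are exactly the two filters
-- of B's deduplicated prefix.
lemma nvu_loop_inv (arr2 : List Int) (arr1 : List Int) : ∀ (d : List Int),
    nvuLoopA arr2 arr1 (d.filter (fun i => decide (i ∉ arr2))) (d.filter (fun i => decide (i ∈ arr2)))
      = ((nvuDedup arr1 d).filter (fun i => decide (i ∉ arr2)),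
         (nvuDedup arr1 d).filter (fun i => decide (i ∈ arr2))) := by
  induction arr1 with
  | nil => intro d; simp [nvuLoopA, nvuDedup]
  | cons i rest ih =>
    intro d
    by_cases h2 : i ∈ arr2
    · have hc : i ∉ d.filter (fun i => decide (i ∉ arr2)) := by simp [h2]
      by_cases hd : i ∈ d
      · have hu : i ∈ d.filter (fun i => decide (i ∈ arr2)) := by simp [hd, h2]
        simp only [nvuLoopA, nvuDedup, h2, hd, hc, hu, not_true_eq_false, not_false_eq_true,
          if_true, if_false]
        simpa [h2, hd] using ih d
      · have hu : i ∉ d.filter (fun i => decide (i ∈ arr2)) := by simp [hd]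
        simp only [nvuLoopA, nvuDedup, h2, hd, hc, hu, not_true_eq_false, not_false_eq_true,
          if_true, if_false]
        have := ih (d ++ [i])
        simpa [List.filter_append, h2] using this
    · by_cases hd : i ∈ d
      · have hc : i ∈ d.filter (fun i => decide (i ∉ arr2)) := by simp [hd, h2]
        simp only [nvuLoopA, nvuDedup, h2, hd, hc, not_true_eq_false, not_false_eq_true,
          if_true, if_false]
        simpa [h2, hd] using ih d
      · have hc : i ∉ d.filter (fun i => decide (i ∉ arr2)) := by simp [hd]
        simp only [nvuLoopA, nvuDedup, h2, hd, hc, not_false_eq_true,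
          if_true]
        have := ih (d ++ [i])
        simpa [List.filter_append, h2] using this

-- ===== VERDICT (by name: the statement is the Claim_ definition above) =====
theorem new_vs_update_spec : Claim_equal_new_vs_update := by
  intro arr1 arr2 _
  unfold Spec_new_vs_update new_vs_update new_vs_update_alt
  simpa using nvu_loop_inv arr2 arr1 []
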